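-- pv_equiv track=rewrite | github.com/finnergizer/twitter-information-retrieval-system | twitter_irs/query.py | create_document_vectors
-- ===== SOURCE A (Python) =====
-- def create_document_vectors(query_vector, doc_list, index):
--     '''
--     :param query_vector: a query vector
--     :param doc_list: a set of document ids for documents containing at least one query term
--     :param index: an index of terms associated to a list of document maps containing ids w/ term frequencys
--     :return: the document frequency vectors for the query
--     '''
--     doc_vectors = {}
--     for doc_id in doc_list:
--         doc_vectors[doc_id]=[]
--     i = 0
--     for term in query_vector:
--         term_list = index.get(term,{})
--         for doc_id in doc_list:
--             doc_vectors[doc_id].insert(i, term_list.get(doc_id,0))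
--         i = i + 1;
--     return doc_vectors
-- ===== SOURCE B (Python) =====
-- def create_document_vectors(query_vector, doc_list, index):
--     # Sparse scatter: preallocate an all-zero row per document, then walk each
--     # query term's posting map and write only the nonzero frequencies in place.
--     n = len(query_vector)
--     doc_vectors = {doc_id: [0] * n for doc_id in doc_list}
--     for i, term in enumerate(query_vector):
--         for doc_id, freq in index.get(term, {}).items():
--             row = doc_vectors.get(doc_id)
--             if row is not None:
--                 row[i] = freq
--     return doc_vectors
-- ===== Notes on version B (the rewrite author's own statement) =====
-- stated objective: faster
-- what changed: Replaces A's dense term-major grid filling (outer loop over query terms, positional insert at index i into every doc's growing list, O(i) per insert) by a sparse scatter: every document gets a preallocated all-zero row and only the postings actually stored in the index are written into their positions, so documents absent from a term's posting map cost nothing for that term.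
import Mathlib
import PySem

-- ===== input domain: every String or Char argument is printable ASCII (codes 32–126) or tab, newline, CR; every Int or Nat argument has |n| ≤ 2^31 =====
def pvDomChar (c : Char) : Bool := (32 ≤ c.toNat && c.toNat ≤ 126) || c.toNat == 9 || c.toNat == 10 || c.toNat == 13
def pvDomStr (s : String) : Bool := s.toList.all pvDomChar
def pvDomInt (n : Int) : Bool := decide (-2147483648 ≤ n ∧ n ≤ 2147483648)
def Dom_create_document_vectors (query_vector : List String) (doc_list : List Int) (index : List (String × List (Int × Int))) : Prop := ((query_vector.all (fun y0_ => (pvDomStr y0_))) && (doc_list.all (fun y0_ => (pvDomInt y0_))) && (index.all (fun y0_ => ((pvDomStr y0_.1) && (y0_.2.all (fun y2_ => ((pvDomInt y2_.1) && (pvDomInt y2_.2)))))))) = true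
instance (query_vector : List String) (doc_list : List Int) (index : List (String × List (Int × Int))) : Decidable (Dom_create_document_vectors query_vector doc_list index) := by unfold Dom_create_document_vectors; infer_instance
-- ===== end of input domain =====

-- B replaces A's dense term-major grid filling (positional insert at index i into
-- every doc's growing row) by a sparse scatter: all-zero rows are preallocated and
-- only the postings actually present in the index are written; objective: faster.

-- ===== PORT A =====
def create_document_vectors (query_vector : List String) (doc_list : List Int) (index : List (String × List (Int × Int))) : List (Int × List Int) :=
  -- doc_vectors = {}; for doc_id in doc_list: doc_vectors[doc_id] = []
  let dv0 : PySem.Dict Int (List Int) :=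
    doc_list.foldl (fun d doc_id => d.insert doc_id []) PySem.Dict.empty
  -- i = 0; for term in query_vector: … ; i = i + 1
  let res :=
    query_vector.foldl (fun (st : PySem.Dict Int (List Int) × Int) term =>
      let term_list : PySem.Dict Int Int := PySem.Dict.mk ((PySem.Dict.mk index).getD term [])
      let dv := doc_list.foldl
        (fun dv doc_id => dv.modify doc_id [] (fun l => PySem.List.insert l st.2 (term_list.getD doc_id 0))) st.1
      (dv, st.2 + 1)) (dv0, (0 : Int))
  res.1.items

-- ===== PORT B =====
def create_document_vectors_alt (query_vector : List String) (doc_list : List Int) (index : List (String × List (Int × Int))) : List (Int × List Int) :=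
  -- n = len(query_vector); doc_vectors = {doc_id: [0]*n for doc_id in doc_list}
  let n := query_vector.length
  let dv0 : PySem.Dict Int (List Int) :=
    doc_list.foldl (fun d doc_id => d.insert doc_id (List.replicate n (0 : Int))) PySem.Dict.empty
  -- for i, term in enumerate(query_vector):
  --   for doc_id, freq in index.get(term, {}).items():   (inner lists encode dicts: under
  --     Pre_ their keys are unique, so the stored list IS the dict's items, in order)
  --     row = doc_vectors.get(doc_id)
  --     if row is not None: row[i] = freq
  let dv := (PySem.List.enumerate query_vector 0).foldl
    (fun dv it =>
      ((PySem.Dict.mk index).getD it.2 []).foldl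
        (fun dv p =>
          match dv.get? p.1 with
          | some row => dv.insert p.1 (PySem.List.pySetD row it.1 p.2)
          | none => dv) dv) dv0
  dv.items

-- ===== PRECONDITION & SPEC =====
-- Pre_ only states the Python type invariants the list encoding loses: doc_list encodes a
-- Python set (no duplicate ids — with duplicates A's repeated positional insert into the one
-- shared row interleaves accidentally) and each inner list encodes a Python dict (unique
-- keys); neither kind of excluded input is representable in Python.
def Pre_create_document_vectors (query_vector : List String) (doc_list : List Int) (index : List (String × List (Int × Int))) : Prop :=
  doc_list.Nodup ∧ ∀ p ∈ index, (p.2.map Prod.fst).Nodup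
instance (query_vector : List String) (doc_list : List Int) (index : List (String × List (Int × Int))) : Decidable (Pre_create_document_vectors query_vector doc_list index) := by unfold Pre_create_document_vectors; infer_instance

def pvWitness_create_document_vectors : List String × List Int × (List (String × List (Int × Int))) :=
  (["a", "b"], [1, 2], [("a", [(1, 3)]), ("b", [(2, 5)])])

def Spec_create_document_vectors (query_vector : List String) (doc_list : List Int) (index : List (String × List (Int × Int))) (out : List (Int × List Int)) : Prop := out = create_document_vectors_alt query_vector doc_list index
instance (query_vector : List String) (doc_list : List Int) (index : List (String × List (Int × Int))) (out : List (Int × List Int)) : Decidable (Spec_create_document_vectors query_vector doc_list index out) := by unfold Spec_create_document_vectors; infer_instance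

-- ===== CLAIM (what is proved, stated in full; the proofs are below) =====
def Claim_equal_create_document_vectors : Prop := ∀ (query_vector : List String) (doc_list : List Int) (index : List (String × List (Int × Int))), Dom_create_document_vectors query_vector doc_list index → Pre_create_document_vectors query_vector doc_list index → Spec_create_document_vectors query_vector doc_list index (create_document_vectors query_vector doc_list index)

-- ===== LEMMAS AND PROOFS =====

-- python list.insert at index = length appends
theorem pyInsert_length_append (l : List Int) (x : Int) :
    PySem.List.insert l (l.length : Int) x = l ++ [x] := by
  have h : (PySem.List.sliceIndices l.length (some (l.length : Int)) none 1).1.toNat = l.length := by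
    simp [PySem.List.sliceIndices]; omega
  simp [PySem.List.insert, h]

-- a modify-loop leaves untouched keys alone
theorem getD_foldl_modify_not_mem (l : List Int) (F : Int → List Int → List Int)
    (dv : PySem.Dict Int (List Int)) (d : Int) (hd : d ∉ l) :
    (l.foldl (fun dv doc => dv.modify doc [] (F doc)) dv).getD d [] = dv.getD d [] := by
  induction l generalizing dv with
  | nil => rfl
  | cons a t ih =>
    simp only [List.mem_cons, not_or] at hd
    rw [List.foldl_cons, ih _ hd.2, PySem.Dict.getD_modify_of_ne _ _ _ hd.1]

-- a modify-loop over distinct keys applies F once to each member key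
theorem getD_foldl_modify_mem (l : List Int) (F : Int → List Int → List Int)
    (dv : PySem.Dict Int (List Int)) (d : Int) (hnd : l.Nodup) (hd : d ∈ l) :
    (l.foldl (fun dv doc => dv.modify doc [] (F doc)) dv).getD d [] = F d (dv.getD d []) := by
  induction l generalizing dv with
  | nil => cases hd
  | cons a t ih =>
    simp only [List.nodup_cons] at hnd
    rw [List.foldl_cons]
    rcases List.mem_cons.mp hd with h | h
    · subst h
      rw [getD_foldl_modify_not_mem _ _ _ _ hnd.1, PySem.Dict.getD_modify_self]
    · rw [ih _ hnd.2 h, PySem.Dict.getD_modify_of_ne]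
      intro he; exact hnd.1 (he ▸ h)

-- an insert-loop leaves untouched keys alone
theorem get?_foldl_insert_not_mem (l : List Int) (V : Int → List Int)
    (dv : PySem.Dict Int (List Int)) (d : Int) (hd : d ∉ l) :
    (l.foldl (fun dv doc => dv.insert doc (V doc)) dv).get? d = dv.get? d := by
  induction l generalizing dv with
  | nil => rfl
  | cons a t ih =>
    simp only [List.mem_cons, not_or] at hd
    rw [List.foldl_cons, ih _ hd.2, PySem.Dict.get?_insert_of_ne _ _ hd.1]

-- an insert-loop over distinct keys stores V at each member key
theorem get?_foldl_insert_mem (l : List Int) (V : Int → List Int)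
    (dv : PySem.Dict Int (List Int)) (d : Int) (hnd : l.Nodup) (hd : d ∈ l) :
    (l.foldl (fun dv doc => dv.insert doc (V doc)) dv).get? d = some (V d) := by
  induction l generalizing dv with
  | nil => cases hd
  | cons a t ih =>
    simp only [List.nodup_cons] at hnd
    rw [List.foldl_cons]
    rcases List.mem_cons.mp hd with h | h
    · subst h
      rw [get?_foldl_insert_not_mem _ _ _ _ hnd.1, PySem.Dict.get?_insert_self]
    · exact ih _ hnd.2 h

-- keys of a value-building insert-loop from empty over a nodup list
theorem keys_foldl_insert_nodup (l : List Int) (V : PySem.Dict Int (List Int) → Int → List Int) (hnd : l.Nodup) :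
    (l.foldl (fun dv doc => dv.insert doc (V dv doc)) (PySem.Dict.empty : PySem.Dict Int (List Int))).keys = l := by
  rw [PySem.Dict.keys_foldl_insert, PySem.Dict.keys_empty, PySem.Set.update_nil_left,
    PySem.Set.ofList_eq_self_of_nodup _ hnd]

-- updating a set with elements it already has changes nothing
theorem set_update_of_subset (s : PySem.Set Int) (xs : List Int) (h : ∀ x ∈ xs, x ∈ s) :
    PySem.Set.update s xs = s := by
  rw [PySem.Set.update_eq_append_filter]
  have : List.filter (fun y => !s.contains y) (PySem.Set.ofList xs) = [] := by
    apply List.filter_eq_nil_iff.mpr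
    intro y hy
    have hm : y ∈ s := h y ((PySem.Set.mem_ofList xs y).mp hy)
    simp [hm]
  rw [this, List.append_nil]

-- first-match lookup in a literal dict is List.find? on the raw pairs
theorem get?_mk_eq_find? {ν : Type} (l : List (Int × ν)) (d : Int) :
    (PySem.Dict.mk l).get? d = (l.find? (fun p => p.1 == d)).map Prod.snd := by
  induction l with
  | nil => rfl
  | cons a t ih =>
    rw [PySem.Dict.get?_mk_cons]
    by_cases h : a.1 = d
    · simp [List.find?, h]
    · simp only [List.find?]
      have hb : (a.1 == d) = false := by simp [h]
      simp [hb, ih]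

theorem get?_mk_str_eq_find? {ν : Type} (l : List (String × ν)) (d : String) :
    (PySem.Dict.mk l).get? d = (l.find? (fun p => p.1 == d)).map Prod.snd := by
  induction l with
  | nil => rfl
  | cons a t ih =>
    rw [PySem.Dict.get?_mk_cons]
    by_cases h : a.1 = d
    · simp [List.find?, h]
    · simp only [List.find?]
      have hb : (a.1 == d) = false := by simp [h]
      simp [hb, ih]

-- the value A reads for term t at doc d, written through find?
def valA (index : List (String × List (Int × Int))) (d : Int) (t : String) : Int :=
  (((((PySem.Dict.mk index).getD t []).find? (fun p => p.1 == d)).map Prod.snd).getD 0)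

theorem getD_mk_eq_valA (index : List (String × List (Int × Int))) (d : Int) (t : String) :
    (PySem.Dict.mk ((PySem.Dict.mk index).getD t [])).getD d 0 = valA index d t := by
  rw [PySem.Dict.getD_eq_get?_getD, get?_mk_eq_find?]; rfl

-- setting just past a prefix
theorem set_append_cons (pre : List Int) (x v : Int) (rest : List Int) :
    (pre ++ x :: rest).set pre.length v = pre ++ v :: rest := by
  induction pre with
  | nil => rfl
  | cons a t ih => simp [ih]

-- ---- B's inner scatter loop ----
def stepI (i : Int) (dv : PySem.Dict Int (List Int)) (p : Int × Int) : PySem.Dict Int (List Int) :=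
  match dv.get? p.1 with
  | some row => dv.insert p.1 (PySem.List.pySetD row i p.2)
  | none => dv

theorem keys_foldl_stepI (l : List (Int × Int)) (i : Int) (dv : PySem.Dict Int (List Int)) :
    (l.foldl (stepI i) dv).keys = dv.keys := by
  induction l generalizing dv with
  | nil => rfl
  | cons a t ih =>
    rw [List.foldl_cons, ih]
    unfold stepI
    cases h : dv.get? a.1 with
    | none => rfl
    | some row =>
      have hc : dv.contains a.1 = true := by
        rw [PySem.Dict.contains_eq_isSome_get?, h]; rfl
      exact PySem.Dict.keys_insert_of_contains _ _ hc

theorem get?_foldl_stepI_not_mem (l : List (Int × Int)) (i : Int)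
    (dv : PySem.Dict Int (List Int)) (d : Int) (hd : ∀ p ∈ l, p.1 ≠ d) :
    (l.foldl (stepI i) dv).get? d = dv.get? d := by
  induction l generalizing dv with
  | nil => rfl
  | cons a t ih =>
    rw [List.foldl_cons, ih _ (fun p hp => hd p (List.mem_cons_of_mem a hp))]
    unfold stepI
    cases h : dv.get? a.1 with
    | none => rfl
    | some row => exact PySem.Dict.get?_insert_of_ne _ _ (Ne.symm (hd a List.mem_cons_self))

theorem get?_foldl_stepI (l : List (Int × Int)) (i : Int)
    (hnd : (l.map Prod.fst).Nodup) (dv : PySem.Dict Int (List Int)) (d : Int) :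
    (l.foldl (stepI i) dv).get? d =
      (dv.get? d).map (fun row =>
        match l.find? (fun p => p.1 == d) with
        | some p => PySem.List.pySetD row i p.2
        | none => row) := by
  induction l generalizing dv with
  | nil => cases h : dv.get? d <;> simp [h]
  | cons a t ih =>
    simp only [List.map_cons, List.nodup_cons] at hnd
    rw [List.foldl_cons]
    by_cases hk : a.1 = d
    · have hfind : (a :: t).find? (fun p => p.1 == d) = some a := by
        simp [List.find?, hk]
      have hnot : ∀ p ∈ t, p.1 ≠ d := by
        intro p hp he
        apply hnd.1
        rw [hk, ← he]
        exact List.mem_map_of_mem hp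
      rw [get?_foldl_stepI_not_mem _ _ _ _ hnot, hfind]
      unfold stepI
      cases h : dv.get? a.1 with
      | none => rw [hk] at h; rw [h]; rfl
      | some row =>
        rw [hk] at h
        rw [hk, PySem.Dict.get?_insert_self, h]; rfl
    · have hb : (a.1 == d) = false := by simp [hk]
      have hfind : (a :: t).find? (fun p => p.1 == d) = t.find? (fun p => p.1 == d) := by
        simp [List.find?, hb]
      rw [ih hnd.2, hfind]
      unfold stepI
      cases h : dv.get? a.1 with
      | none => rfl
      | some row => rw [PySem.Dict.get?_insert_of_ne _ _ (fun he => hk he.symm)]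

-- ---- the two whole loops, named for the proofs (definitionally the ports' bodies) ----
def Aloop (index : List (String × List (Int × Int))) (doc_list : List Int)
    (st : PySem.Dict Int (List Int) × Int) (qv : List String) : PySem.Dict Int (List Int) × Int :=
  qv.foldl (fun (st : PySem.Dict Int (List Int) × Int) term =>
      let term_list : PySem.Dict Int Int := PySem.Dict.mk ((PySem.Dict.mk index).getD term [])
      let dv := doc_list.foldl
        (fun dv doc_id => dv.modify doc_id [] (fun l => PySem.List.insert l st.2 (term_list.getD doc_id 0))) st.1
      (dv, st.2 + 1)) st

def Bloop (index : List (String × List (Int × Int))) (es : List (Int × String))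
    (dv : PySem.Dict Int (List Int)) : PySem.Dict Int (List Int) :=
  es.foldl (fun dv it => ((PySem.Dict.mk index).getD it.2 []).foldl (stepI it.1) dv) dv

-- invariant of A's term loop: keys unchanged, each doc's row extended by its column
theorem loopA (index : List (String × List (Int × Int))) (doc_list : List Int) (hnd : doc_list.Nodup)
    (qv : List String) : ∀ (dv : PySem.Dict Int (List Int)) (i : Int),
    (∀ d ∈ doc_list, ((dv.getD d []).length : Int) = i) →
    (∀ d ∈ doc_list, d ∈ dv.keys) →
    (Aloop index doc_list (dv, i) qv).1.keys = dv.keys ∧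
    ∀ d ∈ doc_list,
      (Aloop index doc_list (dv, i) qv).1.getD d [] =
      dv.getD d [] ++ qv.map (fun t => (PySem.Dict.mk ((PySem.Dict.mk index).getD t [])).getD d 0) := by
  induction qv with
  | nil => intro dv i _ _; exact ⟨rfl, fun d _ => by simp [Aloop]⟩
  | cons t qv ih =>
    intro dv i hlen hkeys
    set tl : PySem.Dict Int Int := PySem.Dict.mk ((PySem.Dict.mk index).getD t []) with htl
    set dv1 : PySem.Dict Int (List Int) := doc_list.foldl
      (fun dv doc_id => dv.modify doc_id [] (fun l => PySem.List.insert l i (tl.getD doc_id 0))) dv with hdv1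
    have hstep : Aloop index doc_list (dv, i) (t :: qv) = Aloop index doc_list (dv1, i + 1) qv := rfl
    have hget1 : ∀ d ∈ doc_list, dv1.getD d [] = dv.getD d [] ++ [tl.getD d 0] := by
      intro d hd
      rw [hdv1, getD_foldl_modify_mem _ _ _ _ hnd hd, ← hlen d hd, pyInsert_length_append]
    have hkeys1 : dv1.keys = dv.keys := by
      rw [hdv1, PySem.Dict.keys_foldl_modify]
      exact set_update_of_subset _ _ hkeys
    have hlen1 : ∀ d ∈ doc_list, (((dv1.getD d []).length : Int)) = i + 1 := by
      intro d hd
      rw [hget1 d hd]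
      simp only [List.length_append, List.length_cons, List.length_nil]
      push_cast
      rw [hlen d hd]
    have hmem1 : ∀ d ∈ doc_list, d ∈ dv1.keys := by
      intro d hd; rw [hkeys1]; exact hkeys d hd
    have this' := ih dv1 (i + 1) hlen1 hmem1
    rw [hstep]
    refine ⟨this'.1.trans hkeys1, ?_⟩
    intro d hd
    rw [this'.2 d hd, hget1 d hd, List.map_cons, List.append_assoc, List.singleton_append]

-- inner posting lists have unique keys under Pre_
theorem nodup_postings (index : List (String × List (Int × Int)))
    (hix : ∀ p ∈ index, (p.2.map Prod.fst).Nodup) (t : String) :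
    ((((PySem.Dict.mk index).getD t []) : List (Int × Int)).map Prod.fst).Nodup := by
  rw [PySem.Dict.getD_eq_get?_getD, get?_mk_str_eq_find?]
  cases hf : index.find? (fun p => p.1 == t) with
  | none => simp
  | some p =>
    have hp : p ∈ index := List.mem_of_find?_eq_some hf
    simpa using hix p hp

-- invariant of B's scatter loop: keys unchanged, each doc's zero suffix replaced by its row
theorem loopB (index : List (String × List (Int × Int))) (doc_list : List Int)
    (hix : ∀ p ∈ index, (p.2.map Prod.fst).Nodup) (ts : List String) :
    ∀ (k : Nat) (dv : PySem.Dict Int (List Int)) (pre : Int → List Int),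
    (∀ d ∈ doc_list, (pre d).length = k) →
    (∀ d ∈ doc_list, dv.get? d = some (pre d ++ List.replicate ts.length 0)) →
    (Bloop index (PySem.List.enumerate ts (k : Int)) dv).keys = dv.keys ∧
    ∀ d ∈ doc_list,
      (Bloop index (PySem.List.enumerate ts (k : Int)) dv).get? d =
        some (pre d ++ ts.map (fun t => valA index d t)) := by
  induction ts with
  | nil =>
    intro k dv pre _ hdv
    refine ⟨by simp [PySem.List.enumerate_nil, Bloop], fun d hd => ?_⟩
    simpa [PySem.List.enumerate_nil, Bloop] using hdv d hd
  | cons t ts ih =>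
    intro k dv pre hpre hdv
    have henum : PySem.List.enumerate (t :: ts) (k : Int) =
        ((k : Int), t) :: PySem.List.enumerate ts ((k + 1 : Nat) : Int) := by
      rw [PySem.List.enumerate_cons]; push_cast; ring_nf
    set l : List (Int × Int) := (PySem.Dict.mk index).getD t [] with hl
    set dv1 : PySem.Dict Int (List Int) := l.foldl (stepI (k : Int)) dv with hdv1
    have hstep : Bloop index (PySem.List.enumerate (t :: ts) (k : Int)) dv =
        Bloop index (PySem.List.enumerate ts ((k + 1 : Nat) : Int)) dv1 := by
      rw [henum]; rfl
    have hndl : (l.map Prod.fst).Nodup := nodup_postings index hix t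
    have hget1 : ∀ d ∈ doc_list,
        dv1.get? d = some ((pre d ++ [valA index d t]) ++ List.replicate ts.length 0) := by
      intro d hd
      rw [hdv1, get?_foldl_stepI l _ hndl dv d, hdv d hd]
      simp only [Option.map_some, List.length_cons]
      cases hf : l.find? (fun p => p.1 == d) with
      | none =>
        have hv : valA index d t = 0 := by unfold valA; rw [← hl, hf]; rfl
        rw [hv]
        simp [List.replicate_succ, List.append_assoc]
      | some p =>
        have hv : valA index d t = p.2 := by unfold valA; rw [← hl, hf]; rfl
        have hset : PySem.List.pySetD (pre d ++ List.replicate (ts.length + 1) 0) (k : Int) p.2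
            = pre d ++ p.2 :: List.replicate ts.length 0 := by
          rw [PySem.List.pySetD_natCast, ← hpre d hd, List.replicate_succ, set_append_cons]
        simp only [hset]
        rw [hv]
        simp [List.append_assoc]
    have hkeys1 : dv1.keys = dv.keys := keys_foldl_stepI l _ dv
    have hpre1 : ∀ d ∈ doc_list, (pre d ++ [valA index d t]).length = k + 1 := by
      intro d hd; simp [hpre d hd]
    have this' := ih (k + 1) dv1 (fun d => pre d ++ [valA index d t]) hpre1 hget1
    rw [hstep]
    refine ⟨this'.1.trans hkeys1, fun d hd => ?_⟩
    rw [this'.2 d hd]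
    simp [List.append_assoc]

-- A's whole computation equals B's, spelled on the explicit expressions
theorem main_eq (qv : List String) (dl : List Int) (ix : List (String × List (Int × Int)))
    (hnd : dl.Nodup) (hix : ∀ p ∈ ix, (p.2.map Prod.fst).Nodup) :
    (Aloop ix dl (dl.foldl (fun d doc_id => d.insert doc_id []) PySem.Dict.empty, 0) qv).1.items =
    (Bloop ix (PySem.List.enumerate qv 0)
      (dl.foldl (fun d doc_id => d.insert doc_id (List.replicate qv.length (0 : Int))) PySem.Dict.empty)).items := by
  -- A side
  set dvA0 : PySem.Dict Int (List Int) :=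
    dl.foldl (fun d doc_id => d.insert doc_id []) PySem.Dict.empty with hdvA0
  have hkA0 : dvA0.keys = dl := keys_foldl_insert_nodup dl (fun _ _ => []) hnd
  have hgA0 : ∀ d ∈ dl, dvA0.getD d [] = [] := by
    intro d hd
    rw [hdvA0, PySem.Dict.getD_eq_get?_getD, get?_foldl_insert_mem dl (fun _ => []) _ d hnd hd]
    rfl
  have hA := loopA ix dl hnd qv dvA0 0 (fun d hd => by rw [hgA0 d hd]; rfl)
    (fun d hd => by rw [hkA0]; exact hd)
  set rA := (Aloop ix dl (dvA0, 0) qv).1 with hrA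
  -- B side
  set dvB0 : PySem.Dict Int (List Int) :=
    dl.foldl (fun d doc_id => d.insert doc_id (List.replicate qv.length (0 : Int))) PySem.Dict.empty with hdvB0
  have hkB0 : dvB0.keys = dl :=
    keys_foldl_insert_nodup dl (fun _ _ => List.replicate qv.length 0) hnd
  have hgB0 : ∀ d ∈ dl, dvB0.get? d = some (([] : List Int) ++ List.replicate qv.length 0) := by
    intro d hd
    rw [hdvB0, get?_foldl_insert_mem dl (fun _ => List.replicate qv.length 0) _ d hnd hd]
    simp
  have hzero : ((0 : Nat) : Int) = (0 : Int) := rfl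
  have hB := loopB ix dl hix qv 0 dvB0 (fun _ => []) (fun d _ => rfl) hgB0
  rw [hzero] at hB
  set rB := Bloop ix (PySem.List.enumerate qv 0) dvB0 with hrB
  -- compare items
  have hkA : rA.keys = dl := by rw [hA.1, hkA0]
  have hkB : rB.keys = dl := by rw [hB.1, hkB0]
  have hndA : rA.keys.Nodup := by rw [hkA]; exact hnd
  have hndB : rB.keys.Nodup := by rw [hkB]; exact hnd
  rw [PySem.Dict.items_eq_map_keys rA hndA [], PySem.Dict.items_eq_map_keys rB hndB [], hkA, hkB]
  apply List.map_congr_left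
  intro d hd
  have hAd : rA.getD d [] = qv.map (fun t => (PySem.Dict.mk ((PySem.Dict.mk ix).getD t [])).getD d 0) := by
    rw [hA.2 d hd, hgA0 d hd, List.nil_append]
  have hBd : rB.getD d [] = qv.map (fun t => valA ix d t) := by
    rw [PySem.Dict.getD_eq_get?_getD, hB.2 d hd]; rfl
  rw [hAd, hBd]
  exact congrArg _ (List.map_congr_left (fun t _ => getD_mk_eq_valA ix d t))

-- ===== VERDICT (by name: the statement is the Claim_ definition above) =====
theorem create_document_vectors_spec : Claim_equal_create_document_vectors := by
  intro qv dl ix _ hpre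
  exact main_eq qv dl ix hpre.1 hpre.2
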